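-- pv_equiv track=rewrite | github.com/ishmam-hossain/problem-solving | leetcode/36_valid_sudoku.py | getSquaresAsItr
-- ===== SOURCE A (Python) =====
-- def getSquaresAsItr(board):
--     for i in range(0, len(board), 3):
--         for j in range(0, len(board), 3):
--             box = []
--             for row in range(i, i+3):
--                 for col in range(j, j+3):
--                     box.append(board[row][col])
--             yield box
-- ===== SOURCE B (Python) =====
-- def getSquaresAsItr(board):
--     n = len(board)
--     nb = n // 3
--     boxes = [[] for _ in range(nb * nb)]
--     for r in range(n):
--         for c in range(n):
--             boxes[(r // 3) * nb + c // 3].append(board[r][c])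
--     yield from boxes
-- ===== Notes on version B (the rewrite author's own statement) =====
-- stated objective: alternative
-- what changed: B replaces A's box-by-box extraction with four nested block loops by a single row-major sweep that scatters each cell into one of (n//3)^2 pre-allocated buckets, yielding the buckets at the end.
import Mathlib
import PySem

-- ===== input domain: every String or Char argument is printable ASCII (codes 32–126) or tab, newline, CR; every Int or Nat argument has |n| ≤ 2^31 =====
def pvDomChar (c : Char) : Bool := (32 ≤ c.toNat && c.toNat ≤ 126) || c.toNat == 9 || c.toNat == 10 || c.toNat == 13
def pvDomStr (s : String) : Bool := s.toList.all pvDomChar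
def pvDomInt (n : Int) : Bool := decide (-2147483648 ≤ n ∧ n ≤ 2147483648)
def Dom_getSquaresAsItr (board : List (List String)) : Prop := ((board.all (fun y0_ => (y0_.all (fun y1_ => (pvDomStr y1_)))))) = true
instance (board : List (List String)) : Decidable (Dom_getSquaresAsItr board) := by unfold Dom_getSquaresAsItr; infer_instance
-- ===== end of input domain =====

-- B replaces A's box-by-box extraction (nested block loops) with a single row-major sweep that
-- scatters each cell into one of (n//3)^2 pre-allocated buckets; same cost, different decomposition.

-- ===== PORT A =====
-- literal transliteration of A: generator → list of yielded boxes; board[row][col] via pyGetD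
-- (exact under Pre_, which guarantees every index is in range, i.e. Python does not raise)
def getSquaresAsItr (board : List (List String)) : List (List String) :=
  let n : Int := board.length
  (PySem.List.pyRange 0 n 3).foldl (fun out i =>
    (PySem.List.pyRange 0 n 3).foldl (fun out j =>
      let box := (PySem.List.pyRange i (i+3) 1).foldl (fun box row =>
        (PySem.List.pyRange j (j+3) 1).foldl (fun box col =>
          box ++ [PySem.List.pyGetD (PySem.List.pyGetD board row []) col ""]) box) []
      out ++ [box]) out) []

-- ===== PORT B =====
-- literal transliteration of Source B: pre-allocated buckets, one row-major scatter pass, yield buckets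
def getSquaresAsItr_alt (board : List (List String)) : List (List String) :=
  let n : Int := board.length
  let nb : Int := PySem.Int.floordiv n 3
  let boxes0 : List (List String) := (PySem.List.pyRange 0 (nb*nb) 1).map (fun _ => [])
  (PySem.List.pyRange 0 n 1).foldl (fun boxes r =>
    (PySem.List.pyRange 0 n 1).foldl (fun boxes c =>
      let idx : Int := (PySem.Int.floordiv r 3) * nb + PySem.Int.floordiv c 3
      PySem.List.pySetD boxes idx
        (PySem.List.pyGetD boxes idx [] ++
          [PySem.List.pyGetD (PySem.List.pyGetD board r []) c ""])) boxes) boxes0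

-- ===== PRECONDITION & SPEC =====
-- Pre_ = exactly the inputs on which Python A returns: the board height is a multiple of 3 and
-- every row is at least as long as the board is high (otherwise board[row][col] raises IndexError).
def Pre_getSquaresAsItr (board : List (List String)) : Prop :=
  board.length % 3 = 0 ∧ ∀ row ∈ board, board.length ≤ row.length
instance (board : List (List String)) : Decidable (Pre_getSquaresAsItr board) := by
  unfold Pre_getSquaresAsItr; infer_instance

def pvWitness_getSquaresAsItr : List (List String) :=
  [["1","2","3"],["4","5","6"],["7","8","9"]]

def Spec_getSquaresAsItr (board : List (List String)) (out : List (List String)) : Prop := out = getSquaresAsItr_alt board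
instance (board : List (List String)) (out : List (List String)) : Decidable (Spec_getSquaresAsItr board out) := by unfold Spec_getSquaresAsItr; infer_instance

-- ===== CLAIM (what is proved, stated in full; the proofs are below) =====
def Claim_equal_getSquaresAsItr : Prop := ∀ (board : List (List String)), Dom_getSquaresAsItr board → Pre_getSquaresAsItr board → Spec_getSquaresAsItr board (getSquaresAsItr board)

-- ===== LEMMAS AND PROOFS =====

-- the cell both programs read at (r, c), Nat-indexed
def pvCell (board : List (List String)) (r c : Nat) : String := (board.getD r []).getD c ""

-- the nine cells of box (bi, bj), in A's order
def pvBox (board : List (List String)) (bi bj : Nat) : List String :=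
  (List.range 3).flatMap (fun dr => (List.range 3).map (fun dc => pvCell board (3*bi+dr) (3*bj+dc)))

theorem flatMap_congr_left {α β : Type} {l : List α} {f g : α → List β}
    (h : ∀ a ∈ l, f a = g a) : l.flatMap f = l.flatMap g := by
  simp only [List.flatMap_def]
  exact congrArg List.flatten (List.map_congr_left h)

theorem A_canon (board : List (List String)) (m : Nat) (hn : board.length = 3*m) :
    getSquaresAsItr board =
      (List.range m).flatMap (fun bi => (List.range m).map (fun bj => pvBox board bi bj)) := by
  unfold getSquaresAsItr
  simp only [hn]
  rw [PySem.List.pyRange_of_pos (s := 3) 0 ((3*m : Nat) : Int) (by norm_num)]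
  have hcnt : (if (0:Int) < (3*m:Nat) then ((((3*m:Nat):Int) - 0 + 3 - 1)/3).toNat else 0) = m := by
    split <;> omega
  rw [hcnt]
  simp only [List.foldl_map, PySem.List.foldl_append_singleton_eq_map,
    PySem.List.foldl_append_eq_flatMap, List.nil_append]
  simp only [PySem.List.pyRange_one, add_sub_cancel_left]
  simp only [List.flatMap_map, List.map_map, pvBox, pvCell]
  norm_num
  apply flatMap_congr_left
  intro bi _
  apply List.map_congr_left
  intro bj _
  apply flatMap_congr_left
  intro dr _
  apply List.map_congr_left
  intro dc _
  simp only [Function.comp_apply]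
  have e1 : (3*(bi:Int)+(dr:Int)) = ((3*bi+dr : Nat):Int) := by push_cast; ring
  have e2 : (3*(bj:Int)+(dc:Int)) = ((3*bj+dc : Nat):Int) := by push_cast; ring
  rw [e1, e2]
  simp only [PySem.List.pyGetD_natCast, List.getD]

theorem scatter_length (ps : List (Nat × String)) (bs : List (List String)) :
    (ps.foldl (fun bs p => bs.set p.1 (bs.getD p.1 [] ++ [p.2])) bs).length = bs.length := by
  induction ps generalizing bs with
  | nil => rfl
  | cons p ps ih =>
    simp only [List.foldl_cons]
    rw [ih]
    simp

theorem scatter_getD (ps : List (Nat × String)) (bs : List (List String))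
    (h : ∀ p ∈ ps, p.1 < bs.length) (k : Nat) :
    (ps.foldl (fun bs p => bs.set p.1 (bs.getD p.1 [] ++ [p.2])) bs).getD k []
      = bs.getD k [] ++ (ps.filter (fun p => p.1 == k)).map Prod.snd := by
  induction ps generalizing bs with
  | nil => simp
  | cons p ps ih =>
    simp only [List.foldl_cons, List.filter_cons]
    have hp : p.1 < bs.length := h p (by simp)
    rw [ih _ (by intro q hq; simpa using h q (by simp [hq]))]
    by_cases hk : p.1 = k
    · subst hk
      simp [List.getD, hp]
    · simp [List.getD, hk, beq_iff_eq]

theorem filter_div3 (m b : Nat) (hb : b < m) :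
    (List.range (3*m)).filter (fun c => c/3 == b) = [3*b, 3*b+1, 3*b+2] := by
  induction m with
  | zero => omega
  | succ m ih =>
    have h3 : 3*(m+1) = 3*m + 1 + 1 + 1 := by ring
    rw [h3, List.range_succ, List.range_succ, List.range_succ]
    simp only [List.filter_append]
    rcases Nat.lt_or_ge b m with hbm | hbm
    · rw [ih hbm]
      have e1 : (3*m)/3 = m := by omega
      have e2 : (3*m+1)/3 = m := by omega
      have e3 : (3*m+1+1)/3 = m := by omega
      have hne : (m == b) = false := by simp; omega
      simp [List.filter, e1, e2, e3, hne]
    · have hbm' : b = m := by omega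
      subst hbm'
      have hpre : (List.range (3*b)).filter (fun c => c/3 == b) = [] := by
        rw [List.filter_eq_nil_iff]
        intro c hc
        simp only [List.mem_range] at hc
        simp only [beq_iff_eq]
        omega
      have e1 : (3*b)/3 = b := by omega
      have e2 : (3*b+1)/3 = b := by omega
      have e3 : (3*b+1+1)/3 = b := by omega
      simp [hpre, List.filter, e1, e2, e3]

theorem flatMap_map_range {α : Type} (a b : Nat) (g : Nat → Nat → α) :
    (List.range a).flatMap (fun i => (List.range b).map (g i))
      = (List.range (a*b)).map (fun K => g (K/b) (K%b)) := by
  induction a with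
  | zero => simp
  | succ a ih =>
    have h : (a+1)*b = a*b + b := by ring
    rw [List.range_succ, h, List.range_add]
    simp only [List.flatMap_append, List.map_append, List.map_map, ih, List.flatMap_cons, List.flatMap_nil, List.append_nil]
    congr 1
    apply List.map_congr_left
    intro c hc
    simp only [List.mem_range] at hc
    have hb : 0 < b := by omega
    simp only [Function.comp_apply]
    have h1 : (a*b + c)/b = a := by
      rw [Nat.add_comm, Nat.mul_comm, Nat.add_mul_div_left _ _ hb, Nat.div_eq_of_lt hc]; omega
    have h2 : (a*b + c)%b = c := by
      rw [Nat.add_comm, Nat.mul_comm, Nat.add_mul_mod_self_left, Nat.mod_eq_of_lt hc]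
    rw [h1, h2]

theorem flatMap_ite {α β : Type} (p : α → Prop) [DecidablePred p] (g : α → List β) (l : List α) :
    l.flatMap (fun a => if p a then g a else [])
      = (l.filter (fun a => decide (p a))).flatMap g := by
  induction l with
  | nil => rfl
  | cons a l ih =>
    by_cases hp : p a <;> simp [hp, ih]

theorem filter_flatMap' {α β : Type} (l : List α) (g : α → List β) (p : β → Bool) :
    (l.flatMap g).filter p = l.flatMap (fun a => (g a).filter p) := by
  induction l with
  | nil => rfl
  | cons a l ih => simp [List.filter_append, ih]

theorem bucket_eq (board : List (List String)) (m bi bj : Nat) (hbi : bi < m) (hbj : bj < m) :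
    (((List.range (3*m)).flatMap (fun r => (List.range (3*m)).map
        (fun c => (r/3*m + c/3, pvCell board r c)))).filter
        (fun p => p.1 == bi*m+bj)).map Prod.snd = pvBox board bi bj := by
  have hm : 0 < m := by omega
  rw [filter_flatMap', List.map_flatMap]
  have hrow : ∀ r, (((List.range (3*m)).map (fun c => (r/3*m + c/3, pvCell board r c))).filter
      (fun p => p.1 == bi*m+bj)).map Prod.snd
      = if r/3 = bi then ((List.range (3*m)).filter (fun c => c/3 == bj)).map (pvCell board r) else [] := by
    intro r
    rw [List.filter_map, List.map_map]
    by_cases hr : r/3 = bi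
    · rw [if_pos hr]
      have : ((List.range (3*m)).filter ((fun p => p.1 == bi*m+bj) ∘ (fun c => (r/3*m + c/3, pvCell board r c))))
           = (List.range (3*m)).filter (fun c => c/3 == bj) := by
        apply List.filter_congr
        intro c _
        simp only [Function.comp_apply, hr]
        rw [Bool.eq_iff_iff]
        simp only [beq_iff_eq]
        omega
      rw [this]
      rfl
    · rw [if_neg hr]
      have : ((List.range (3*m)).filter ((fun p => p.1 == bi*m+bj) ∘ (fun c => (r/3*m + c/3, pvCell board r c)))) = [] := by
        rw [List.filter_eq_nil_iff]
        intro c hc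
        simp only [List.mem_range] at hc
        simp only [Function.comp_apply, beq_iff_eq]
        intro heq
        have hcd : c/3 < m := by omega
        have : r/3 = bi := by
          have h1 : (r/3*m + c/3)/m = r/3 := by
            rw [Nat.mul_comm, Nat.add_comm, Nat.add_mul_div_left _ _ hm, Nat.div_eq_of_lt hcd]; omega
          have h2 : (bi*m + bj)/m = bi := by
            rw [Nat.mul_comm, Nat.add_comm, Nat.add_mul_div_left _ _ hm, Nat.div_eq_of_lt hbj]; omega
          rw [← h1, heq, h2]
        exact hr this
      rw [this]
      rfl
  calc (List.range (3*m)).flatMap (fun r => (((List.range (3*m)).map (fun c => (r/3*m + c/3, pvCell board r c))).filter (fun p => p.1 == bi*m+bj)).map Prod.snd)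
      = (List.range (3*m)).flatMap (fun r => if r/3 = bi then ((List.range (3*m)).filter (fun c => c/3 == bj)).map (pvCell board r) else []) := by
        exact flatMap_congr_left (fun r _ => hrow r)
    _ = pvBox board bi bj := by
        rw [flatMap_ite, filter_div3 m bj hbj]
        have : (List.range (3*m)).filter (fun r => decide (r/3 = bi)) = [3*bi, 3*bi+1, 3*bi+2] := by
          have := filter_div3 m bi hbi
          simpa [beq_iff_eq] using this
        rw [this]
        simp [pvBox, List.range_succ]

theorem B_scatter (board : List (List String)) (m : Nat) (hn : board.length = 3*m) :
    getSquaresAsItr_alt board =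
      ((List.range (3*m)).flatMap (fun r => (List.range (3*m)).map
          (fun c => (r/3*m + c/3, pvCell board r c)))).foldl
        (fun bs p => bs.set p.1 (bs.getD p.1 [] ++ [p.2])) (List.replicate (m*m) []) := by
  unfold getSquaresAsItr_alt
  simp only [hn]
  have hnb : PySem.Int.floordiv ((3*m : Nat) : Int) 3 = (m : Int) := by
    rw [PySem.Int.floordiv_eq_ediv_of_pos (by norm_num)]; omega
  rw [hnb]
  have hb0 : (PySem.List.pyRange 0 ((m:Int)*(m:Int)) 1).map (fun _ => ([] : List String))
      = List.replicate (m*m) [] := by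
    rw [show ((m:Int)*(m:Int)) = ((m*m : Nat) : Int) by push_cast; ring, PySem.List.pyRange_one]
    rw [List.map_map]
    rw [show ((fun _ => ([]:List String)) ∘ fun k : Nat => (0:Int) + (k:Int)) = fun _ : Nat => ([]:List String) from rfl]
    rw [List.map_const', List.length_range]
    congr 1
  rw [hb0, List.foldl_flatMap]
  rw [PySem.List.pyRange_one]
  simp only [List.foldl_map]
  rw [show ((((3*m:Nat):Int)) - 0).toNat = 3*m by omega]
  have fd : ∀ k : Nat, PySem.Int.floordiv ((k:Nat):Int) 3 = ((k/3 : Nat) : Int) := fun k => by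
    rw [PySem.Int.floordiv_eq_ediv_of_pos (by norm_num)]; omega
  congr 1
  funext bs r
  congr 1
  funext bs' c
  simp only [zero_add, fd]
  rw [show ((r/3 : Nat):Int) * (m:Int) + ((c/3:Nat):Int) = ((r/3*m + c/3 : Nat) : Int) by push_cast; ring]
  simp only [PySem.List.pySetD_natCast, PySem.List.pyGetD_natCast]
  rfl

theorem idx_lt (m r c : Nat) (hr : r < 3*m) (hc : c < 3*m) : r/3*m + c/3 < m*m := by
  have h1 : r/3 < m := by omega
  have h2 : c/3 < m := by omega
  calc r/3*m + c/3 < r/3*m + m := by omega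
    _ = (r/3+1)*m := by ring
    _ ≤ m*m := Nat.mul_le_mul_right m (by omega)

theorem B_canon (board : List (List String)) (m : Nat) (hn : board.length = 3*m) :
    getSquaresAsItr_alt board =
      (List.range (m*m)).map (fun K => pvBox board (K/m) (K%m)) := by
  rw [B_scatter board m hn]
  have hidx : ∀ p ∈ (List.range (3*m)).flatMap (fun r => (List.range (3*m)).map
      (fun c => (r/3*m + c/3, pvCell board r c))),
      p.1 < (List.replicate (m*m) ([] : List String)).length := by
    intro p hp
    simp only [List.mem_flatMap, List.mem_map, List.mem_range] at hp
    obtain ⟨r, hr, c, hc, rfl⟩ := hp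
    simpa using idx_lt m r c hr hc
  have hlen : (((List.range (3*m)).flatMap (fun r => (List.range (3*m)).map
      (fun c => (r/3*m + c/3, pvCell board r c)))).foldl
        (fun bs p => bs.set p.1 (bs.getD p.1 [] ++ [p.2])) (List.replicate (m*m) [])).length = m*m := by
    rw [scatter_length]; simp
  apply List.ext_getElem
  · rw [hlen]; simp
  · intro K h1 h2
    have hK : K < m*m := by rw [hlen] at h1; exact h1
    have hm : 0 < m := by
      rcases Nat.eq_zero_or_pos m with h | h
      · subst h; omega
      · exact h
    rw [← List.getD_eq_getElem _ [] h1, scatter_getD _ _ hidx K]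
    have hbi : K/m < m := (Nat.div_lt_iff_lt_mul hm).mpr hK
    have hbj : K%m < m := Nat.mod_lt _ hm
    have hKeq : K/m*m + K%m = K := by
      rw [Nat.mul_comm]; exact Nat.div_add_mod K m
    have hb := bucket_eq board m (K/m) (K%m) hbi hbj
    rw [hKeq] at hb
    simp only [List.getD, List.getElem?_replicate, hK, if_pos, Option.getD_some, List.nil_append]
    rw [hb, List.getElem_map, List.getElem_range]

-- ===== VERDICT (by name: the statement is the Claim_ definition above) =====
theorem getSquaresAsItr_spec : Claim_equal_getSquaresAsItr := by
  intro board _ hpre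
  unfold Spec_getSquaresAsItr
  obtain ⟨h3, _⟩ := hpre
  obtain ⟨m, hm⟩ : ∃ m, board.length = 3*m := ⟨board.length / 3, by omega⟩
  rw [A_canon board m hm, B_canon board m hm, flatMap_map_range]
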